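-- pv_equiv track=rewrite | github.com/paulross/PyCppContainers | src/cpy/code_gen.py | comment_list_str
-- ===== SOURCE A (Python) =====
-- import typing
--
-- def comment_str(s: str) -> str:
--     assert '\n' not in s
--     return '//{}'.format(s)
--
-- def comment_list_str(inputs: typing.List[str]) -> typing.List[str]:
--     """Returns the strings as a C++ comments."""
--     ret = []
--     for s in inputs:
--         if '\n' in s:
--             ret.extend([comment_str(v) for v in s.split('\n')])
--         else:
--             ret.append(comment_str(s))
--     return ret
-- ===== SOURCE B (Python) =====
-- import typing
--
-- def comment_list_str(inputs: typing.List[str]) -> typing.List[str]: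
--     """Returns the strings as a C++ comments."""
--     if not inputs:
--         return []
--     return ['//' + p for p in '\n'.join(inputs).split('\n')]
-- ===== Notes on version B (the rewrite author's own statement) =====
-- stated objective: simpler
-- what changed: Replaces the per-element loop with its '\n'-in-s branch dispatch and nested split/extend by a single whole-list join, one split of the joined string, and one map prefixing '//'.
import Mathlib
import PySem

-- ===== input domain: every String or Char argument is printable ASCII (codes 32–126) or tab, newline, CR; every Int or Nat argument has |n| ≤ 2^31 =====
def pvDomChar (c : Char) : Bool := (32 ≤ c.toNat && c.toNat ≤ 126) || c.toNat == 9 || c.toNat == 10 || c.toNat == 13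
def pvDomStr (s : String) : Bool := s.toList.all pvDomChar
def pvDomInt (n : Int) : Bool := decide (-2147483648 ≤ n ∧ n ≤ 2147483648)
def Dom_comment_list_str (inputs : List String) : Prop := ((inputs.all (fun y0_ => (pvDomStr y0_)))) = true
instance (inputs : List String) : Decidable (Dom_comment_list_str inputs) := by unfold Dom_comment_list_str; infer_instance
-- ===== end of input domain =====

-- B replaces A's per-element branch-and-split loop by one join of the whole list,
-- one split of the joined string, and one map prefixing '//' (objective: simpler).

-- ===== PORT A =====
-- '//{}'.format(s); the assert '\n' not in s always holds at A's call sites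
def commentStrA (s : String) : String := String.ofList ('/' :: '/' :: s.toList)

def comment_list_str (inputs : List String) : List String :=
  inputs.foldl
    (fun ret s =>
      if PySem.Str.isIn "\n" s then
        -- s.split('\n') with the non-empty separator "\n" (PySem.Chars.split? "\n" = some (splitOn))
        ret ++ ((PySem.Chars.splitOn s.toList "\n".toList).map String.ofList).map (fun v => commentStrA v)
      else
        ret ++ [commentStrA s])
    []

-- ===== PORT B =====
def comment_list_str_alt (inputs : List String) : List String :=
  if inputs = [] then []
  else
    ((PySem.Chars.splitOn (PySem.Str.join "\n" inputs).toList "\n".toList).map String.ofList).map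
      (fun p => String.ofList ('/' :: '/' :: p.toList))   -- '//' + p

-- ===== PRECONDITION & SPEC =====
def Spec_comment_list_str (inputs : List String) (out : List String) : Prop := out = comment_list_str_alt inputs
instance (inputs : List String) (out : List String) : Decidable (Spec_comment_list_str inputs out) := by unfold Spec_comment_list_str; infer_instance

-- ===== CLAIM (what is proved, stated in full; the proofs are below) =====
def Claim_equal_comment_list_str : Prop := ∀ (inputs : List String), Dom_comment_list_str inputs → Spec_comment_list_str inputs (comment_list_str inputs)

-- ===== LEMMAS AND PROOFS =====

-- structural reference version of Python's s.split(c) for a single-character separator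
def mySplit (c : Char) : List Char → List Char → List (List Char)
  | [], cur => [cur.reverse]
  | x :: rest, cur => if x = c then cur.reverse :: mySplit c rest [] else mySplit c rest (x :: cur)

theorem go_eq (c : Char) : ∀ (l : List Char) (fuel : Nat) (cur : List Char) (acc : List (List Char)),
    l.length < fuel →
    PySem.Chars.splitOn.go [c] fuel l cur acc = acc.reverse ++ mySplit c l cur := by
  intro l
  induction l with
  | nil =>
    intro fuel cur acc h
    match fuel with
    | fuel + 1 => simp [PySem.Chars.splitOn.go, mySplit]
  | cons x rest ih =>
    intro fuel cur acc h
    match fuel with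
    | fuel + 1 =>
      by_cases hx : x = c
      · subst hx
        simp only [PySem.Chars.splitOn.go, List.isPrefixOf, BEq.rfl, Bool.true_and,
          if_pos, List.length_cons, List.drop_succ_cons, List.length_nil, List.drop_zero]
        rw [ih fuel [] (cur.reverse :: acc) (by simpa using Nat.lt_of_succ_lt_succ h)]
        simp [mySplit]
      · simp only [PySem.Chars.splitOn.go]
        rw [if_neg (by simp [List.isPrefixOf]; exact fun hcx => hx hcx.symm)]
        rw [ih fuel (x :: cur) acc (by simpa using Nat.lt_of_succ_lt_succ h)]
        simp [mySplit, hx]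

theorem splitOn_eq_mySplit (c : Char) (s : List Char) :
    PySem.Chars.splitOn s [c] = mySplit c s [] := by
  unfold PySem.Chars.splitOn
  rw [go_eq c s (s.length + 1) [] [] (Nat.lt_succ_self _)]
  simp

theorem mySplit_of_not_mem (c : Char) : ∀ (s cur : List Char), c ∉ s →
    mySplit c s cur = [cur.reverse ++ s] := by
  intro s
  induction s with
  | nil => intro cur _; simp [mySplit]
  | cons x rest ih =>
    intro cur h
    have hx : x ≠ c := fun hxc => h (by simp [hxc])
    rw [mySplit, if_neg hx, ih (x :: cur) (fun hc => h (by simp [hc]))]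
    simp

theorem mySplit_append (c : Char) : ∀ (a b cur : List Char),
    mySplit c (a ++ c :: b) cur = mySplit c a cur ++ mySplit c b [] := by
  intro a
  induction a with
  | nil => intro b cur; simp [mySplit]
  | cons x rest ih =>
    intro b cur
    by_cases hx : x = c
    · subst hx; simp [mySplit, ih]
    · simp [mySplit, hx, ih]

theorem mySplit_join (c : Char) : ∀ (x : List Char) (xs : List (List Char)),
    mySplit c (PySem.Chars.join [c] (x :: xs)) [] =
      (x :: xs).flatMap (fun s => mySplit c s []) := by
  intro x xs
  induction xs generalizing x with
  | nil => simp [PySem.Chars.join, List.intercalate]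
  | cons y ys ih =>
    have hjoin : PySem.Chars.join [c] (x :: y :: ys) = x ++ c :: PySem.Chars.join [c] (y :: ys) := by
      simp [PySem.Chars.join, List.intercalate, List.intersperse]
    rw [hjoin, mySplit_append, ih y]
    simp

-- per-element: A's branch equals mapping the comment over the pieces of s
theorem branch_eq (s : String) :
    (if PySem.Str.isIn "\n" s then
        ((PySem.Chars.splitOn s.toList "\n".toList).map String.ofList).map (fun v => commentStrA v)
      else [commentStrA s])
    = (mySplit '\n' s.toList []).map (fun p => String.ofList ('/' :: '/' :: p)) := by
  have hsep : ("\n" : String).toList = ['\n'] := rfl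
  by_cases h : PySem.Str.isIn "\n" s = true
  · rw [if_pos h, hsep, splitOn_eq_mySplit]
    simp [commentStrA]
  · rw [if_neg h]
    have hmem : '\n' ∉ s.toList := by
      intro hm
      apply h
      unfold PySem.Str.isIn
      rw [hsep]
      obtain ⟨l₁, l₂, hl⟩ := List.append_of_mem hm
      exact (PySem.Chars.isIn_iff_infix _ _).2 ⟨l₁, l₂, by rw [hl]; simp⟩
    rw [mySplit_of_not_mem '\n' s.toList [] hmem]
    simp [commentStrA]

theorem comment_list_str_eq_flatMap (inputs : List String) :
    comment_list_str inputs =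
      inputs.flatMap (fun s => (mySplit '\n' s.toList []).map
        (fun p => String.ofList ('/' :: '/' :: p))) := by
  unfold comment_list_str
  rw [show (fun (ret : List String) (s : String) =>
      if PySem.Str.isIn "\n" s then
        ret ++ ((PySem.Chars.splitOn s.toList "\n".toList).map String.ofList).map (fun v => commentStrA v)
      else ret ++ [commentStrA s])
    = (fun ret s => ret ++ (mySplit '\n' s.toList []).map (fun p => String.ofList ('/' :: '/' :: p)))
    from funext fun ret => funext fun s => by
      rw [← branch_eq s]; split <;> rfl]
  induction inputs using List.reverseRecOn with
  | nil => simp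
  | append_singleton xs x ih => simp [List.foldl_append, ih]

-- ===== VERDICT (by name: the statement is the Claim_ definition above) =====
theorem comment_list_str_spec : Claim_equal_comment_list_str := by
  intro inputs _
  unfold Spec_comment_list_str
  rw [comment_list_str_eq_flatMap]
  match inputs with
  | [] => rfl
  | x :: xs =>
    unfold comment_list_str_alt
    rw [if_neg (by simp)]
    have hsep : ("\n" : String).toList = ['\n'] := rfl
    have hofl : ∀ cs : List Char, (String.ofList cs).toList = cs := by
      intro cs; simp
    have hjoin : (PySem.Str.join "\n" (x :: xs)).toList
        = PySem.Chars.join ['\n'] ((x :: xs).map String.toList) := by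
      simp [PySem.Str.join, hofl]
    rw [hsep, hjoin]
    rw [show (x :: xs).map String.toList = x.toList :: xs.map String.toList from rfl]
    rw [splitOn_eq_mySplit, mySplit_join]
    simp [List.map_flatMap, List.flatMap_map, Function.comp_def, hofl]
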